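-- pv_equiv track=rewrite | github.com/VBSX/TesteTecnicoB5S | 6.py | arraySort
-- ===== SOURCE A (Python) =====
-- def arraySort(array):
--     output = []
--
--     for number in array:
--
--         if number == 0:
--             output.append(number)
--
--     for number in array:
--
--         if number == 1:
--             output.append(number)
--
--     for number in array:
--
--         if number == 2:
--             output.append(number)
--
--     for number in array:
--
--         if number == 3:
--             output.append(number)
--     for number in array:
--
--         if number == 4:
--             output.append(number)
--
--     for number in array:
--
--         if number == 5:
--             output.append(number)
--
--     for number in array:
--
--         if number == 6:
--             output.append(number)
--
--     for number in array:
--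
--         if number == 7:
--             output.append(number)
--
--     for number in array:
--
--         if number == 8:
--             output.append(number)
--
--     for number in array:
--
--         if number == 9:
--             output.append(number)
--
--     return output
-- ===== SOURCE B (Python) =====
-- def arraySort(array):
--     return sorted(x for x in array if 0 <= x <= 9)
-- ===== Notes on version B (the rewrite author's own statement) =====
-- stated objective: simpler
-- what changed: Replaces ten order-preserving per-digit scans of the array with a single filter of the digits 0-9 followed by one comparison sort.
import Mathlib
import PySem

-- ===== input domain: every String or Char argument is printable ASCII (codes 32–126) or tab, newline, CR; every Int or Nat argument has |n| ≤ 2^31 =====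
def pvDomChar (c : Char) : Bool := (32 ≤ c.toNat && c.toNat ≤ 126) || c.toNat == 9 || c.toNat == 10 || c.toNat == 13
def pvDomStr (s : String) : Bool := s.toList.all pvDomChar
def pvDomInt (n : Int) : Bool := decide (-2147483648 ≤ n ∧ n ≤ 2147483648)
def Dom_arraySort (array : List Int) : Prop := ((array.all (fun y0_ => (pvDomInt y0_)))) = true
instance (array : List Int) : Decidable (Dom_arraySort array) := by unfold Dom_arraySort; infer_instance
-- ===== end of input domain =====

-- B replaces A's ten order-preserving per-digit scans with one filter + one sort (objective: simpler).

-- ===== PORT A =====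
-- ten passes over the array, each appending the occurrences of one digit, in order 0..9
def arraySort (array : List Int) : List Int :=
  let output : List Int := []
  let output := array.foldl (fun acc number => if number == 0 then acc ++ [number] else acc) output
  let output := array.foldl (fun acc number => if number == 1 then acc ++ [number] else acc) output
  let output := array.foldl (fun acc number => if number == 2 then acc ++ [number] else acc) output
  let output := array.foldl (fun acc number => if number == 3 then acc ++ [number] else acc) output
  let output := array.foldl (fun acc number => if number == 4 then acc ++ [number] else acc) output
  let output := array.foldl (fun acc number => if number == 5 then acc ++ [number] else acc) output
  let output := array.foldl (fun acc number => if number == 6 then acc ++ [number] else acc) output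
  let output := array.foldl (fun acc number => if number == 7 then acc ++ [number] else acc) output
  let output := array.foldl (fun acc number => if number == 8 then acc ++ [number] else acc) output
  let output := array.foldl (fun acc number => if number == 9 then acc ++ [number] else acc) output
  output

-- ===== PORT B =====
-- sorted(x for x in array if 0 <= x <= 9)
def arraySort_alt (array : List Int) : List Int :=
  PySem.List.sorted (array.filter (fun x => decide (0 ≤ x ∧ x ≤ 9))) (fun x => x) false

-- ===== PRECONDITION & SPEC =====
def Spec_arraySort (array : List Int) (out : List Int) : Prop := out = arraySort_alt array
instance (array : List Int) (out : List Int) : Decidable (Spec_arraySort array out) := by unfold Spec_arraySort; infer_instance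

-- ===== CLAIM (what is proved, stated in full; the proofs are below) =====
def Claim_equal_arraySort : Prop := ∀ (array : List Int), Dom_arraySort array → Spec_arraySort array (arraySort array)

-- ===== LEMMAS AND PROOFS =====

-- A's result as a concatenation of per-digit filters
def pvConcat (l : List Int) : List Int :=
  l.filter (fun n => n == 0) ++ l.filter (fun n => n == 1) ++ l.filter (fun n => n == 2) ++
  l.filter (fun n => n == 3) ++ l.filter (fun n => n == 4) ++ l.filter (fun n => n == 5) ++
  l.filter (fun n => n == 6) ++ l.filter (fun n => n == 7) ++ l.filter (fun n => n == 8) ++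
  l.filter (fun n => n == 9)

theorem arraySort_eq_concat (l : List Int) : arraySort l = pvConcat l := by
  show List.foldl _ (List.foldl _ (List.foldl _ (List.foldl _ (List.foldl _ (List.foldl _
    (List.foldl _ (List.foldl _ (List.foldl _ (List.foldl _ [] l) l) l) l) l) l) l) l) l) l = _
  rw [PySem.List.foldl_append_if_eq_filter, PySem.List.foldl_append_if_eq_filter,
      PySem.List.foldl_append_if_eq_filter, PySem.List.foldl_append_if_eq_filter,
      PySem.List.foldl_append_if_eq_filter, PySem.List.foldl_append_if_eq_filter,
      PySem.List.foldl_append_if_eq_filter, PySem.List.foldl_append_if_eq_filter,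
      PySem.List.foldl_append_if_eq_filter, PySem.List.foldl_append_if_eq_filter]
  simp [pvConcat]

theorem pv_count_filter_ne {v d : Int} (h : v ≠ d) (l : List Int) :
    List.count v (l.filter (fun n => n == d)) = 0 :=
  List.count_eq_zero.mpr (by simp [List.mem_filter]; intro _ h2; exact absurd h2 h)

theorem pvConcat_perm (l : List Int) :
    (pvConcat l).Perm (l.filter (fun x => decide (0 ≤ x ∧ x ≤ 9))) := by
  rw [List.perm_iff_count]
  intro v
  simp only [pvConcat, List.count_append]
  by_cases h : (0 : Int) ≤ v ∧ v ≤ 9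
  · obtain ⟨h0, h9⟩ := h
    interval_cases v <;>
      simp [List.count_filter, pv_count_filter_ne]
  · have hr : List.count v (l.filter (fun x => decide (0 ≤ x ∧ x ≤ 9))) = 0 :=
      List.count_eq_zero.mpr (by simp [List.mem_filter]; intros; omega)
    rw [hr, pv_count_filter_ne (by omega), pv_count_filter_ne (by omega),
        pv_count_filter_ne (by omega), pv_count_filter_ne (by omega),
        pv_count_filter_ne (by omega), pv_count_filter_ne (by omega),
        pv_count_filter_ne (by omega), pv_count_filter_ne (by omega),
        pv_count_filter_ne (by omega), pv_count_filter_ne (by omega)]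

theorem pv_mem_filter_eq {l : List Int} {d x : Int} (hx : x ∈ l.filter (fun n => n == d)) :
    x = d := by
  have := (List.mem_filter.mp hx).2
  simpa using this

theorem pv_block_step (l : List Int) (d : Int) (rest : List Int)
    (hp : rest.Pairwise (· ≤ ·)) (hb : ∀ b ∈ rest, d ≤ b) :
    ((l.filter (fun n => n == d)) ++ rest).Pairwise (· ≤ ·) ∧
      ∀ b ∈ (l.filter (fun n => n == d)) ++ rest, d ≤ b := by
  constructor
  · rw [List.pairwise_append]
    refine ⟨List.pairwise_iff_forall_sublist.mpr ?_, hp, ?_⟩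
    · intro a b hs
      have ha : a ∈ List.filter (fun n => n == d) l := hs.subset (by simp)
      have hb' : b ∈ List.filter (fun n => n == d) l := hs.subset (by simp)
      rw [pv_mem_filter_eq ha, pv_mem_filter_eq hb']
    · intro a ha b hbm
      rw [pv_mem_filter_eq ha]; exact hb b hbm
  · intro b hbm
    rcases List.mem_append.mp hbm with h | h
    · rw [pv_mem_filter_eq h]
    · exact hb b h

theorem pvConcat_pairwise (l : List Int) : (pvConcat l).Pairwise (· ≤ ·) := by
  have h9 := pv_block_step l 9 [] List.Pairwise.nil (by intro b hb; cases hb)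
  have h8 := pv_block_step l 8 _ h9.1 (fun b hb => le_trans (by norm_num) (h9.2 b hb))
  have h7 := pv_block_step l 7 _ h8.1 (fun b hb => le_trans (by norm_num) (h8.2 b hb))
  have h6 := pv_block_step l 6 _ h7.1 (fun b hb => le_trans (by norm_num) (h7.2 b hb))
  have h5 := pv_block_step l 5 _ h6.1 (fun b hb => le_trans (by norm_num) (h6.2 b hb))
  have h4 := pv_block_step l 4 _ h5.1 (fun b hb => le_trans (by norm_num) (h5.2 b hb))
  have h3 := pv_block_step l 3 _ h4.1 (fun b hb => le_trans (by norm_num) (h4.2 b hb))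
  have h2 := pv_block_step l 2 _ h3.1 (fun b hb => le_trans (by norm_num) (h3.2 b hb))
  have h1 := pv_block_step l 1 _ h2.1 (fun b hb => le_trans (by norm_num) (h2.2 b hb))
  have h0 := pv_block_step l 0 _ h1.1 (fun b hb => le_trans (by norm_num) (h1.2 b hb))
  have := h0.1
  simpa [pvConcat, List.append_assoc] using this

-- ===== VERDICT (by name: the statement is the Claim_ definition above) =====
theorem arraySort_spec : Claim_equal_arraySort := by
  intro array _
  unfold Spec_arraySort arraySort_alt
  rw [arraySort_eq_concat]
  exact (PySem.List.sorted_id_eq_of_perm_of_pairwise _ _ (pvConcat_perm array)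
    (pvConcat_pairwise array)).symm
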